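-- pv_equiv track=rewrite | github.com/zxiang77/tierobustness | path_node_removal.py | remove_path
-- ===== SOURCE A (Python) =====
-- def remove_path(A, rm_path):
--     i = 0
--     lenA = len(A)
--     removed_paths = []
--     while i < lenA:
--         lst = A[i]
--         found = False
--         for j in range(len(lst) - 1):
--             if lst[j] == rm_path[0] and lst[j + 1] == rm_path[1]:
--                 if i < lenA:
--                     found = True
--                     removed_paths.append(A[i])
--                     del A[i]
--                     lenA -= 1
--                 break
--         if not found:
--             i += 1
--
--     return removed_paths
-- ===== SOURCE B (Python) =====
-- def remove_path(A, rm_path):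
--     def has_pair(lst):
--         return any(x == rm_path[0] and y == rm_path[1] for x, y in zip(lst, lst[1:]))
--     removed = [lst for lst in A if has_pair(lst)]
--     A[:] = [lst for lst in A if not has_pair(lst)]
--     return removed
-- ===== Notes on version B (the rewrite author's own statement) =====
-- stated objective: simpler
-- what changed: Replaces the in-place delete-with-index-adjustment while loop by a partition: filter the matching sublists (an adjacent-pair predicate over zip(lst, lst[1:])) into the result and rebuild A via slice assignment.
import Mathlib
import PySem

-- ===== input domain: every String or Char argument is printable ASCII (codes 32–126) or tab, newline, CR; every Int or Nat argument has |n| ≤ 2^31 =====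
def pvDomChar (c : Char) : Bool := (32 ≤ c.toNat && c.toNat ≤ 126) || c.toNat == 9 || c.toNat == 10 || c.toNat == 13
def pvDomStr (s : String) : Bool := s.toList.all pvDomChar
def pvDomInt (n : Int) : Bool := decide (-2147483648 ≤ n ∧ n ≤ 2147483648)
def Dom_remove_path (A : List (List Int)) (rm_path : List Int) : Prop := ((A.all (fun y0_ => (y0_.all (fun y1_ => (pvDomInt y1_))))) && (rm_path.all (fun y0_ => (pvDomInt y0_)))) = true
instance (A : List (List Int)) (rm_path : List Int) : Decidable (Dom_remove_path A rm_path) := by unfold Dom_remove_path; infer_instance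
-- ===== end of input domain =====

-- B replaces A's in-place delete-with-index-adjustment while loop by a filter/partition
-- (objective: simpler). Both Pythons mutate A identically; the equivalence proved here is
-- about the RETURN value. Under Pre_ every index access is in range, so the ports use getD.

-- ===== PORT A =====
-- The inner `for j in range(len(lst)-1): if …: found=True; append; del; break` sets found
-- iff some j matches (List.any over the range), and then (the guard i < lenA is always true
-- inside the while) appends A[i] and deletes it; otherwise i advances.
def removePathLoop (A : List (List Int)) (i lenA : Nat) (removed : List (List Int))
    (r0 r1 : Int) : List (List Int) :=
  if _h : i < lenA then
    let lst := A.getD i []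
    let found := (List.range (lst.length - 1)).any
      (fun j => lst.getD j 0 == r0 && lst.getD (j + 1) 0 == r1)
    if found then
      removePathLoop (A.eraseIdx i) i (lenA - 1) (removed ++ [lst]) r0 r1
    else
      removePathLoop A (i + 1) lenA removed r0 r1
  else removed
termination_by lenA - i
decreasing_by all_goals omega

def remove_path (A : List (List Int)) (rm_path : List Int) : List (List Int) :=
  removePathLoop A 0 A.length [] (rm_path.getD 0 0) (rm_path.getD 1 0)

-- ===== PORT B =====
-- has_pair: any adjacent pair (x, y) of lst (zip lst lst.tail) equals (rm_path[0], rm_path[1]).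
def hasPair (rm_path : List Int) (lst : List Int) : Bool :=
  (lst.zip lst.tail).any (fun p => p.1 == rm_path.getD 0 0 && p.2 == rm_path.getD 1 0)

def remove_path_alt (A : List (List Int)) (rm_path : List Int) : List (List Int) :=
  A.filter (hasPair rm_path)

-- ===== PRECONDITION & SPEC =====
-- Pre_ excludes exactly the inputs where Python A raises IndexError on rm_path[0]/rm_path[1]
-- (rm_path[0] is read whenever some sublist has length ≥ 2; rm_path[1] whenever some
-- lst[j] = rm_path[0] with j < len(lst)-1, i.e. rm_path[0] ∈ lst.dropLast).
def Pre_remove_path (A : List (List Int)) (rm_path : List Int) : Prop :=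
  2 ≤ rm_path.length ∨
  (rm_path.length = 1 ∧ ∀ lst ∈ A, rm_path.getD 0 0 ∉ lst.dropLast) ∨
  (rm_path = [] ∧ ∀ lst ∈ A, lst.length ≤ 1)
instance (A : List (List Int)) (rm_path : List Int) : Decidable (Pre_remove_path A rm_path) := by
  unfold Pre_remove_path; infer_instance

def pvWitness_remove_path : List (List Int) × List Int := ([[1, 2, 3], [3, 4], [2]], [1, 2])

def Spec_remove_path (A : List (List Int)) (rm_path : List Int) (out : List (List Int)) : Prop :=
  out = remove_path_alt A rm_path
instance (A : List (List Int)) (rm_path : List Int) (out : List (List Int)) :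
    Decidable (Spec_remove_path A rm_path out) := by unfold Spec_remove_path; infer_instance

-- ===== CLAIM (what is proved, stated in full; the proofs are below) =====
def Claim_equal_remove_path : Prop := ∀ (A : List (List Int)) (rm_path : List Int), Dom_remove_path A rm_path → Pre_remove_path A rm_path → Spec_remove_path A rm_path (remove_path A rm_path)

-- ===== LEMMAS AND PROOFS =====

-- A's inner range-scan equals B's zip-based adjacent-pair predicate.
lemma rangeAny_eq_hasPair (lst : List Int) (r0 r1 : Int) :
    (List.range (lst.length - 1)).any
      (fun j => lst.getD j 0 == r0 && lst.getD (j + 1) 0 == r1) =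
    (lst.zip lst.tail).any (fun p => p.1 == r0 && p.2 == r1) := by
  induction lst with
  | nil => simp
  | cons x xs ih =>
    cases xs with
    | nil => simp
    | cons y rest =>
      have hlen : (x :: y :: rest).length - 1 = ((y :: rest).length - 1) + 1 := by simp
      rw [hlen, List.range_succ_eq_map, List.any_cons, List.any_map]
      simp only [Function.comp_def, List.getD_cons_zero, List.getD_cons_succ]
      simp only [List.getD_cons_succ] at ih
      rw [ih]
      simp

lemma eraseIdx_drop (A : List (List Int)) (i : Nat) (h : i < A.length) :
    (A.eraseIdx i).drop i = A.drop (i + 1) := by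
  rw [List.eraseIdx_eq_take_drop_succ, List.drop_append]
  simp [Nat.le_of_lt h]

lemma removePathLoop_eq (r0 r1 : Int) :
    ∀ (n : Nat) (A : List (List Int)) (i : Nat) (removed : List (List Int)),
    n = A.length - i → i ≤ A.length →
    removePathLoop A i A.length removed r0 r1 =
      removed ++ (A.drop i).filter (fun lst =>
        (List.range (lst.length - 1)).any
          (fun j => lst.getD j 0 == r0 && lst.getD (j + 1) 0 == r1)) := by
  intro n
  induction n with
  | zero =>
    intro A i removed hn hi
    have : i = A.length := by omega
    subst this
    rw [removePathLoop]
    simp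
  | succ m ih =>
    intro A i removed hn hi
    have hlt : i < A.length := by omega
    rw [removePathLoop]
    simp only [hlt, dif_pos]
    have hget : A.getD i [] = A[i] := List.getD_eq_getElem A [] hlt
    have hdrop : A.drop i = A[i] :: A.drop (i + 1) := List.drop_eq_getElem_cons hlt
    by_cases hf : (List.range (A[i].length - 1)).any
        (fun j => A[i].getD j 0 == r0 && A[i].getD (j + 1) 0 == r1) = true
    · rw [hget]
      simp only [hf, if_true]
      have hlen : (A.eraseIdx i).length = A.length - 1 := by
        rw [List.length_eraseIdx_of_lt hlt]
      rw [show A.length - 1 = (A.eraseIdx i).length from hlen.symm,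
        ih (A.eraseIdx i) i (removed ++ [A[i]]) (by omega) (by omega),
        eraseIdx_drop A i hlt, hdrop, List.filter_cons, hf]
      simp
    · rw [hget]
      have hff := eq_false_of_ne_true hf
      simp only [hff, Bool.false_eq_true, if_false]
      rw [ih A (i + 1) removed (by omega) (by omega), hdrop, List.filter_cons, hff]
      simp

-- ===== VERDICT (by name: the statement is the Claim_ definition above) =====
theorem remove_path_spec : Claim_equal_remove_path := by
  intro A rm_path _ _
  unfold Spec_remove_path remove_path remove_path_alt
  rw [removePathLoop_eq (rm_path.getD 0 0) (rm_path.getD 1 0) (A.length - 0) A 0 [] rfl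
    (Nat.zero_le _)]
  simp only [List.drop_zero, List.nil_append]
  congr 1
  funext lst
  rw [rangeAny_eq_hasPair]
  rfl
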